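-- pv_equiv track=rewrite | github.com/hrigx6/Feature-detectors-and-descriptor-implementation-from-scratch | fast.py | check_contiguous_arc
-- ===== SOURCE A (Python) =====
-- def check_contiguous_arc(states, n_contiguous):
--
--     # We need to check for wrap-around (pixel 16 is next to pixel 1)
--     # So we duplicate the array: [1,2,3,...,16,1,2,3,...,16]
--     extended = states + states
--
--     # Check for arc of all brighter (1s)
--     count_bright = 0
--     for i in range(len(extended)):
--         if extended[i] == 1:
--             count_bright = count_bright + 1
--             if count_bright >= n_contiguous:
--                 return True
--         else:
--             count_bright = 0
--
--     # Check for arc of all darker (-1s)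
--     count_dark = 0
--     for i in range(len(extended)):
--         if extended[i] == -1:
--             count_dark = count_dark + 1
--             if count_dark >= n_contiguous:
--                 return True
--         else:
--             count_dark = 0
--
--     return False
-- ===== SOURCE B (Python) =====
-- def check_contiguous_arc(states, n_contiguous):
--     # Single run-length pass over the doubled list: advance over each maximal
--     # run of equal values; succeed on the first +/-1 run long enough.
--     extended = states + states
--     i, m = 0, len(extended)
--     while i < m:
--         j = i
--         while j < m and extended[j] == extended[i]:
--             j += 1
--         if extended[i] in (1, -1) and j - i >= n_contiguous:
--             return True
--         i = j
--     return False
-- ===== Notes on version B (the rewrite author's own statement) =====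
-- stated objective: alternative
-- what changed: Replaces A's two separate counter-with-reset passes (one for 1s, one for -1s) by a single run-length decomposition of the doubled list: each maximal run of equal values is measured once and tested for value +/-1 and length >= n_contiguous.
import Mathlib
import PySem

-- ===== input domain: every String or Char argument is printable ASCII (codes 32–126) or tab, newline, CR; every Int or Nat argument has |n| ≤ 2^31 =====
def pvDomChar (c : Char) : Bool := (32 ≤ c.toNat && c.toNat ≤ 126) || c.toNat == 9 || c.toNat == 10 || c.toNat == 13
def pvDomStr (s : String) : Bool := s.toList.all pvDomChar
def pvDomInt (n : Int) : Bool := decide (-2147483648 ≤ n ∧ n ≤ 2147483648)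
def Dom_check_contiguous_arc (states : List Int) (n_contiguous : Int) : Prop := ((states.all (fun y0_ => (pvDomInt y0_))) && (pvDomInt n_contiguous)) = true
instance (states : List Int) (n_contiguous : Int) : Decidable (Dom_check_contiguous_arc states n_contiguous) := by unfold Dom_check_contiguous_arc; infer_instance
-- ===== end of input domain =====

-- B replaces A's two counter-with-reset passes by one run-length pass over the doubled list (alternative decomposition, same cost); return values proved equal on all inputs.

-- ===== PORT A =====
-- first loop of A: counter of consecutive 1s, reset on anything else, early True
def pvLoopBright (n : Int) : List Int → Int → Bool
  | [], _ => false
  | x :: xs, c =>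
    if x = 1 then
      if c + 1 ≥ n then true else pvLoopBright n xs (c + 1)
    else pvLoopBright n xs 0

-- second loop of A: counter of consecutive -1s
def pvLoopDark (n : Int) : List Int → Int → Bool
  | [], _ => false
  | x :: xs, c =>
    if x = -1 then
      if c + 1 ≥ n then true else pvLoopDark n xs (c + 1)
    else pvLoopDark n xs 0

def check_contiguous_arc (states : List Int) (n_contiguous : Int) : Bool :=
  let extended := states ++ states
  pvLoopBright n_contiguous extended 0 || pvLoopDark n_contiguous extended 0

-- ===== PORT B =====
-- B's inner while: a maximal run (x, its length) then recurse on the rest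
def pvRuns : List Int → List (Int × Nat)
  | [] => []
  | x :: xs =>
    (x, 1 + (xs.takeWhile (· = x)).length) :: pvRuns (xs.dropWhile (· = x))
termination_by l => l.length
decreasing_by
  simp only [List.length_cons]
  exact Nat.lt_succ_of_le (List.length_dropWhile_le _ _)

def check_contiguous_arc_alt (states : List Int) (n_contiguous : Int) : Bool :=
  let extended := states ++ states
  (pvRuns extended).any (fun p => (p.1 == 1 || p.1 == -1) && decide (n_contiguous ≤ (p.2 : Int)))

-- ===== PRECONDITION & SPEC =====
def Spec_check_contiguous_arc (states : List Int) (n_contiguous : Int) (out : Bool) : Prop := out = check_contiguous_arc_alt states n_contiguous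
instance (states : List Int) (n_contiguous : Int) (out : Bool) : Decidable (Spec_check_contiguous_arc states n_contiguous out) := by unfold Spec_check_contiguous_arc; infer_instance

-- ===== CLAIM (what is proved, stated in full; the proofs are below) =====
def Claim_equal_check_contiguous_arc : Prop := ∀ (states : List Int) (n_contiguous : Int), Dom_check_contiguous_arc states n_contiguous → Spec_check_contiguous_arc states n_contiguous (check_contiguous_arc states n_contiguous)

-- ===== LEMMAS AND PROOFS =====

-- a run of m copies of 1: early exit iff the full counter reaches n, else continue
theorem pvLoopBright_replicate (n : Int) (m : Nat) (rest : List Int) (c : Int) :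
    pvLoopBright n (List.replicate m 1 ++ rest) c
      = (decide (1 ≤ m ∧ n ≤ c + (m : Int)) || pvLoopBright n rest (c + (m : Int))) := by
  induction m generalizing c with
  | zero => simp
  | succ k ih =>
    rw [List.replicate_succ, List.cons_append]
    have hstep : pvLoopBright n ((1:Int) :: (List.replicate k 1 ++ rest)) c
        = if c + 1 ≥ n then true else pvLoopBright n (List.replicate k 1 ++ rest) (c + 1) := by
      simp [pvLoopBright]
    rw [hstep]
    by_cases h : c + 1 ≥ n
    · have hdec : (decide (1 ≤ k + 1 ∧ n ≤ c + ((k + 1 : Nat) : Int)) : Bool) = true := by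
        rw [decide_eq_true_iff]; refine ⟨by omega, by push_cast; omega⟩
      rw [if_pos h, hdec, Bool.true_or]
    · rw [if_neg h, ih]
      have e : c + 1 + (k : Int) = c + ((k + 1 : Nat) : Int) := by push_cast; ring
      rw [e]
      congr 1
      rw [decide_eq_decide]
      push_cast
      constructor
      · rintro ⟨-, h2⟩; exact ⟨trivial, h2⟩
      · rintro ⟨-, h2⟩; exact ⟨by omega, h2⟩

theorem pvLoopDark_replicate (n : Int) (m : Nat) (rest : List Int) (c : Int) :
    pvLoopDark n (List.replicate m (-1) ++ rest) c
      = (decide (1 ≤ m ∧ n ≤ c + (m : Int)) || pvLoopDark n rest (c + (m : Int))) := by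
  induction m generalizing c with
  | zero => simp
  | succ k ih =>
    rw [List.replicate_succ, List.cons_append]
    have hstep : pvLoopDark n ((-1:Int) :: (List.replicate k (-1) ++ rest)) c
        = if c + 1 ≥ n then true else pvLoopDark n (List.replicate k (-1) ++ rest) (c + 1) := by
      simp [pvLoopDark]
    rw [hstep]
    by_cases h : c + 1 ≥ n
    · have hdec : (decide (1 ≤ k + 1 ∧ n ≤ c + ((k + 1 : Nat) : Int)) : Bool) = true := by
        rw [decide_eq_true_iff]; refine ⟨by omega, by push_cast; omega⟩
      rw [if_pos h, hdec, Bool.true_or]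
    · rw [if_neg h, ih]
      have e : c + 1 + (k : Int) = c + ((k + 1 : Nat) : Int) := by push_cast; ring
      rw [e]
      congr 1
      rw [decide_eq_decide]
      push_cast
      constructor
      · rintro ⟨-, h2⟩; exact ⟨trivial, h2⟩
      · rintro ⟨-, h2⟩; exact ⟨by omega, h2⟩

-- a non-matching head resets the counter, so the counter value is irrelevant there
theorem pvLoopBright_reset (n : Int) (y : Int) (ys : List Int) (c : Int) (hy : y ≠ 1) :
    pvLoopBright n (y :: ys) c = pvLoopBright n (y :: ys) 0 := by
  simp [pvLoopBright, if_neg hy]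

theorem pvLoopDark_reset (n : Int) (y : Int) (ys : List Int) (c : Int) (hy : y ≠ -1) :
    pvLoopDark n (y :: ys) c = pvLoopDark n (y :: ys) 0 := by
  simp [pvLoopDark, if_neg hy]

theorem takeWhile_eq_replicate (x : Int) (xs : List Int) :
    xs.takeWhile (· = x) = List.replicate (xs.takeWhile (· = x)).length x := by
  rw [List.eq_replicate_iff]
  refine ⟨rfl, fun b hb => ?_⟩
  have := List.mem_takeWhile_imp hb
  simpa using this

theorem head_dropWhile (p : Int → Bool) (l : List Int) (y : Int) (ys : List Int)
    (h : l.dropWhile p = y :: ys) : p y = false := by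
  induction l with
  | nil => simp [List.dropWhile] at h
  | cons a t ih =>
    rw [List.dropWhile_cons] at h
    by_cases ha : p a = true
    · rw [if_pos ha] at h; exact ih h
    · rw [if_neg ha] at h
      cases h; simpa using ha

-- main characterisation: A's bright loop equals "some run of 1s is long enough"
theorem pvLoopBright_runs (n : Int) (l : List Int) :
    pvLoopBright n l 0 = (pvRuns l).any (fun p => p.1 == 1 && decide (n ≤ (p.2 : Int))) := by
  match l with
  | [] => simp [pvLoopBright, pvRuns]
  | x :: xs =>
    have hd : (xs.dropWhile (· = x)).length ≤ xs.length := List.length_dropWhile_le _ _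
    have ih := pvLoopBright_runs n (xs.dropWhile (· = x))
    rw [pvRuns]
    by_cases hx : x = 1
    · subst hx
      have hsplit : (1 : Int) :: xs
          = List.replicate (1 + (xs.takeWhile (· = (1:Int))).length) 1 ++ xs.dropWhile (· = (1:Int)) := by
        rw [Nat.add_comm, List.replicate_succ, List.cons_append,
          ← takeWhile_eq_replicate, List.takeWhile_append_dropWhile]
      rw [show pvLoopBright n ((1:Int) :: xs) 0 = pvLoopBright n (List.replicate (1 + (xs.takeWhile (· = (1:Int))).length) 1 ++ xs.dropWhile (· = (1:Int))) 0 from by rw [← hsplit]]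
      rw [pvLoopBright_replicate]
      have htail : pvLoopBright n (xs.dropWhile (· = (1:Int))) (0 + ((1 + (xs.takeWhile (· = (1:Int))).length : Nat) : Int))
          = pvLoopBright n (xs.dropWhile (· = (1:Int))) 0 := by
        cases hcase : xs.dropWhile (· = (1:Int)) with
        | nil => simp [pvLoopBright]
        | cons y ys =>
          have hy : y ≠ 1 := by
            have := head_dropWhile (· = (1:Int)) xs y ys hcase
            simpa using this
          exact pvLoopBright_reset n y ys _ hy
      rw [htail, ih]
      simp only [List.any_cons]
      congr 1
      simp only [beq_self_eq_true, Bool.true_and, decide_eq_decide]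
      constructor
      · rintro ⟨-, h⟩; simpa using h
      · intro h; exact ⟨by omega, by simpa using h⟩
    · have hstep : pvLoopBright n (x :: xs) 0 = pvLoopBright n xs 0 := by
        simp [pvLoopBright, if_neg hx]
      have hskip : pvLoopBright n xs 0 = pvLoopBright n (xs.dropWhile (· = x)) 0 := by
        conv_lhs => rw [← List.takeWhile_append_dropWhile (p := (· = x)) (l := xs)]
        generalize hT : xs.takeWhile (· = x) = T
        have hall : ∀ a ∈ T, a ≠ 1 := by
          intro a ha
          have : a = x := by
            have := List.mem_takeWhile_imp (hT ▸ ha); simpa using this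
          rw [this]; exact hx
        clear hT
        induction T with
        | nil => simp
        | cons b bs ihb =>
          have hb : b ≠ 1 := hall b (by simp)
          simp only [List.cons_append, pvLoopBright, if_neg hb]
          exact ihb (fun a ha => hall a (by simp [ha]))
      rw [hstep, hskip, ih]
      simp only [List.any_cons]
      have : ((x == 1) && decide (n ≤ ((1 + (xs.takeWhile (· = x)).length : Nat) : Int))) = false := by
        simp [hx]
      rw [this, Bool.false_or]
  termination_by l.length
  decreasing_by simp only [List.length_cons]; exact Nat.lt_succ_of_le hd

theorem pvLoopDark_runs (n : Int) (l : List Int) :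
    pvLoopDark n l 0 = (pvRuns l).any (fun p => p.1 == -1 && decide (n ≤ (p.2 : Int))) := by
  match l with
  | [] => simp [pvLoopDark, pvRuns]
  | x :: xs =>
    have hd : (xs.dropWhile (· = x)).length ≤ xs.length := List.length_dropWhile_le _ _
    have ih := pvLoopDark_runs n (xs.dropWhile (· = x))
    rw [pvRuns]
    by_cases hx : x = -1
    · subst hx
      have hsplit : (-1 : Int) :: xs
          = List.replicate (1 + (xs.takeWhile (· = (-1:Int))).length) (-1) ++ xs.dropWhile (· = (-1:Int)) := by
        rw [Nat.add_comm, List.replicate_succ, List.cons_append,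
          ← takeWhile_eq_replicate, List.takeWhile_append_dropWhile]
      rw [show pvLoopDark n ((-1:Int) :: xs) 0 = pvLoopDark n (List.replicate (1 + (xs.takeWhile (· = (-1:Int))).length) (-1) ++ xs.dropWhile (· = (-1:Int))) 0 from by rw [← hsplit]]
      rw [pvLoopDark_replicate]
      have htail : pvLoopDark n (xs.dropWhile (· = (-1:Int))) (0 + ((1 + (xs.takeWhile (· = (-1:Int))).length : Nat) : Int))
          = pvLoopDark n (xs.dropWhile (· = (-1:Int))) 0 := by
        cases hcase : xs.dropWhile (· = (-1:Int)) with
        | nil => simp [pvLoopDark]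
        | cons y ys =>
          have hy : y ≠ -1 := by
            have := head_dropWhile (· = (-1:Int)) xs y ys hcase
            simpa using this
          exact pvLoopDark_reset n y ys _ hy
      rw [htail, ih]
      simp only [List.any_cons]
      congr 1
      simp only [beq_self_eq_true, Bool.true_and, decide_eq_decide]
      constructor
      · rintro ⟨-, h⟩; simpa using h
      · intro h; exact ⟨by omega, by simpa using h⟩
    · have hstep : pvLoopDark n (x :: xs) 0 = pvLoopDark n xs 0 := by
        simp [pvLoopDark, if_neg hx]
      have hskip : pvLoopDark n xs 0 = pvLoopDark n (xs.dropWhile (· = x)) 0 := by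
        conv_lhs => rw [← List.takeWhile_append_dropWhile (p := (· = x)) (l := xs)]
        generalize hT : xs.takeWhile (· = x) = T
        have hall : ∀ a ∈ T, a ≠ -1 := by
          intro a ha
          have : a = x := by
            have := List.mem_takeWhile_imp (hT ▸ ha); simpa using this
          rw [this]; exact hx
        clear hT
        induction T with
        | nil => simp
        | cons b bs ihb =>
          have hb : b ≠ -1 := hall b (by simp)
          simp only [List.cons_append, pvLoopDark, if_neg hb]
          exact ihb (fun a ha => hall a (by simp [ha]))
      rw [hstep, hskip, ih]
      simp only [List.any_cons]
      have : ((x == -1) && decide (n ≤ ((1 + (xs.takeWhile (· = x)).length : Nat) : Int))) = false := by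
        simp [hx]
      rw [this, Bool.false_or]
  termination_by l.length
  decreasing_by simp only [List.length_cons]; exact Nat.lt_succ_of_le hd

theorem any_split (rs : List (Int × Nat)) (n : Int) :
    rs.any (fun p => (p.1 == 1 || p.1 == -1) && decide (n ≤ (p.2 : Int)))
      = (rs.any (fun p => p.1 == 1 && decide (n ≤ (p.2 : Int)))
         || rs.any (fun p => p.1 == -1 && decide (n ≤ (p.2 : Int)))) := by
  induction rs with
  | nil => simp
  | cons r t ih =>
    rw [List.any_cons, List.any_cons, List.any_cons, ih]
    generalize (r.1 == 1) = a
    generalize (r.1 == -1) = b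
    generalize decide (n ≤ (r.2 : Int)) = d
    generalize t.any (fun p => p.1 == 1 && decide (n ≤ (p.2 : Int))) = X
    generalize t.any (fun p => p.1 == -1 && decide (n ≤ (p.2 : Int))) = Y
    cases a <;> cases b <;> cases d <;> cases X <;> cases Y <;> rfl

-- ===== VERDICT (by name: the statement is the Claim_ definition above) =====
theorem check_contiguous_arc_spec : Claim_equal_check_contiguous_arc := by
  intro states n _
  unfold Spec_check_contiguous_arc check_contiguous_arc check_contiguous_arc_alt
  simp only
  rw [pvLoopBright_runs, pvLoopDark_runs, any_split]
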